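-- pv_equiv track=rewrite | github.com/mtics/paper-analysis | analysis/features/deep/domain_analyzer.py | _classify_subdomain
-- ===== SOURCE A (Python) =====
-- from typing import List, Dict, Tuple, Optional, Set
-- from collections import Counter, defaultdict
--
-- def _classify_subdomain(text: str, subdomains: Dict[str, List[str]]) -> Optional[str]:
--     """Classify paper into a subdomain."""
--     text_lower = text.lower()
--     subdomain_scores = Counter()
--
--     for subdomain, keywords in subdomains.items():
--         for keyword in keywords:
--             if keyword.lower() in text_lower:
--                 subdomain_scores[subdomain] += 1
--
--     if subdomain_scores:
--         return subdomain_scores.most_common(1)[0][0]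
--     return None
-- ===== SOURCE B (Python) =====
-- from typing import List, Dict, Optional
--
-- def _classify_subdomain(text: str, subdomains: Dict[str, List[str]]) -> Optional[str]:
--     """Classify paper into a subdomain via an inverted keyword index:
--     each distinct lowered keyword is substring-tested against the text once,
--     crediting every subdomain it belongs to; then one scan picks the first
--     subdomain with the highest positive score."""
--     text_lower = text.lower()
--
--     # inverted index: lowered keyword -> subdomains it credits (with multiplicity)
--     index: Dict[str, List[str]] = {}
--     for subdomain, keywords in subdomains.items():
--         for keyword in keywords:
--             index.setdefault(keyword.lower(), []).append(subdomain)
--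
--     # one membership test per distinct lowered keyword
--     scores: Dict[str, int] = {}
--     for keyword, names in index.items():
--         if keyword in text_lower:
--             for name in names:
--                 scores[name] = scores.get(name, 0) + 1
--
--     # first subdomain (in input order) with the highest positive score
--     best = None
--     for subdomain in subdomains:
--         score = scores.get(subdomain, 0)
--         if 0 < score and (best is None or best[1] < score):
--             best = (subdomain, score)
--     return best[0] if best is not None else None
-- ===== Notes on version B (the rewrite author's own statement) =====
-- stated objective: alternative
-- what changed: Replaces A's subdomain-major nested membership loop into a Counter plus most_common with an inverted index built once (lowered keyword -> subdomains it credits), so each distinct lowered keyword is substring-tested against the text exactly once and scores are accumulated keyword-major; the winner is then picked by a single ordered scan for the first highest positive score instead of sorting the tally.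
import Mathlib
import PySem

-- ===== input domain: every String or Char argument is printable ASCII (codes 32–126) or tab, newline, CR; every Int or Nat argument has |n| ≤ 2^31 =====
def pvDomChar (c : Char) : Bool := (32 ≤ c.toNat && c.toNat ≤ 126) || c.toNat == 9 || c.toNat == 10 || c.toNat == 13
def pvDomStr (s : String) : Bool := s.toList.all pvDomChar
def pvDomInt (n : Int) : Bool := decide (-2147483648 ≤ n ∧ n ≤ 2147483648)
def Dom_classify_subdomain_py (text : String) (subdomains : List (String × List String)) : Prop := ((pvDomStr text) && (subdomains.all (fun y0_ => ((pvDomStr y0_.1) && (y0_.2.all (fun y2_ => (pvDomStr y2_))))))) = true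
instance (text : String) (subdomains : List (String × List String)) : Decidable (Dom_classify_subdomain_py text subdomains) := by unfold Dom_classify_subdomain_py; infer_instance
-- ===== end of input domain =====

-- B replaces A's subdomain-major membership loop + Counter.most_common by an inverted keyword index (one substring test per distinct lowered keyword) and a single ordered argmax scan; same result, alternative structure.


-- ===== PORT A =====
-- Literal port of A: build the Counter over the dict's (subdomain, keywords) pairs, then
-- most_common(1)[0][0] = head of the items stably sorted by count with reverse=True.
def classify_subdomain_py (text : String) (subdomains : List (String × List String)) : Option String :=
  let text_lower := PySem.Str.lower text
  let subdomain_scores : PySem.Dict String Int :=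
    subdomains.foldl
      (fun d p =>
        p.2.foldl
          (fun d keyword =>
            if PySem.Str.isIn (PySem.Str.lower keyword) text_lower then d.modify p.1 0 (· + 1) else d)
          d)
      PySem.Dict.empty
  if subdomain_scores.items.isEmpty = false then
    ((PySem.List.sorted subdomain_scores.items (fun q => q.2) true).head?).map (fun q => q.1)
  else
    none

-- ===== PORT B =====
-- Port of B: build the inverted index (lowered keyword -> crediting subdomains), score by one
-- membership test per distinct lowered keyword, then scan subdomains for the first highest
-- positive score.  'index.setdefault(k, []).append(n)' is exactly 'd.modify k [] (· ++ [n])'.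
def classify_subdomain_py_alt (text : String) (subdomains : List (String × List String)) : Option String :=
  let text_lower := PySem.Str.lower text
  let index : PySem.Dict String (List String) :=
    subdomains.foldl
      (fun d p => p.2.foldl (fun d keyword => d.modify (PySem.Str.lower keyword) [] (fun l => l ++ [p.1])) d)
      PySem.Dict.empty
  let scores : PySem.Dict String Int :=
    index.items.foldl
      (fun s q =>
        if PySem.Str.isIn q.1 text_lower then q.2.foldl (fun s name => s.modify name 0 (· + 1)) s else s)
      PySem.Dict.empty
  let best :=
    subdomains.foldl
      (fun (acc : Option (String × Int)) p =>
        let score := scores.getD p.1 0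
        if 0 < score && (match acc with | none => true | some b => decide (b.2 < score)) then
          some (p.1, score)
        else acc)
      none
  best.map (fun b => b.1)

-- ===== PRECONDITION & SPEC =====
-- Pre_ excludes association lists with duplicate subdomain names: A's parameter is a Python dict,
-- whose keys are necessarily distinct, so a duplicate-key list represents no actual input of A.
def Pre_classify_subdomain_py (text : String) (subdomains : List (String × List String)) : Prop :=
  (subdomains.map Prod.fst).Nodup
instance (text : String) (subdomains : List (String × List String)) : Decidable (Pre_classify_subdomain_py text subdomains) := by unfold Pre_classify_subdomain_py; infer_instance

def pvWitness_classify_subdomain_py : String × (List (String × List String)) :=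
  ("deep learning for databases", [("ml", ["learning", "neural"]), ("db", ["database", "query"])])

def Spec_classify_subdomain_py (text : String) (subdomains : List (String × List String)) (out : Option String) : Prop := out = classify_subdomain_py_alt text subdomains
instance (text : String) (subdomains : List (String × List String)) (out : Option String) : Decidable (Spec_classify_subdomain_py text subdomains out) := by unfold Spec_classify_subdomain_py; infer_instance

-- ===== CLAIM (what is proved, stated in full; the proofs are below) =====
def Claim_equal_classify_subdomain_py : Prop := ∀ (text : String) (subdomains : List (String × List String)), Dom_classify_subdomain_py text subdomains → Pre_classify_subdomain_py text subdomains → Spec_classify_subdomain_py text subdomains (classify_subdomain_py text subdomains)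

-- ===== LEMMAS AND PROOFS =====

def pvCond (tl : String) (kw : String) : Bool := PySem.Str.isIn (PySem.Str.lower kw) tl
def pvScore (tl : String) (p : String × List String) : Int := (p.2.countP (pvCond tl) : Int)
def pvItems (tl : String) (subs : List (String × List String)) : List (String × Int) :=
  (subs.filter (fun p => p.2.countP (pvCond tl) != 0)).map (fun p => (p.1, pvScore tl p))
def pvFmStep (o : Option (String × Int)) (x : String × Int) : Option (String × Int) :=
  match o with
  | none => some x
  | some q => if q.2 < x.2 then some x else o
def pvFm (l : List (String × Int)) : Option (String × Int) := l.foldl pvFmStep none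
-- the flattened (lowered keyword, subdomain) occurrence list B's index groups
def pvPairs (subs : List (String × List String)) : List (String × String) :=
  subs.flatMap (fun p => p.2.map (fun kw => (PySem.Str.lower kw, p.1)))

theorem pv_map_self {α} (f : α → α) (l : List α) (h : ∀ x ∈ l, f x = x) : l.map f = l := by
  conv_rhs => rw [← List.map_id l]
  exact List.map_congr_left h

theorem pv_modify_last (pre : List (String × Int)) (k : String) (v : Int)
    (h : ∀ p ∈ pre, (p.1 == k) = false) :
    (PySem.Dict.mk (pre ++ [(k, v)])).modify k 0 (· + 1) = PySem.Dict.mk (pre ++ [(k, v + 1)]) := by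
  simp only [PySem.Dict.modify, PySem.Dict.insert, PySem.Dict.contains, PySem.Dict.getD,
    PySem.Dict.get?]
  rw [List.find?_append]
  rw [List.find?_eq_none.mpr (by intro x hx; simp [h x hx])]
  simp only [Option.none_or, List.find?_cons, beq_self_eq_true]
  simp only [List.any_append, List.any_cons, beq_self_eq_true, Bool.or_true, Bool.true_or, if_true]
  simp only [List.map_append]
  rw [pv_map_self _ pre (by intro p hp; simp [h p hp])]
  simp

theorem pv_modify_absent (L : List (String × Int)) (k : String)
    (h : ∀ p ∈ L, (p.1 == k) = false) :
    (PySem.Dict.mk L).modify k 0 (· + 1) = PySem.Dict.mk (L ++ [(k, 1)]) := by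
  simp only [PySem.Dict.modify, PySem.Dict.insert, PySem.Dict.contains, PySem.Dict.getD,
    PySem.Dict.get?]
  rw [List.find?_eq_none.mpr (by intro x hx; simp [h x hx])]
  have hany : (L.any fun p => p.1 == k) = false := by
    simp only [List.any_eq_false]; intro x hx; simp [h x hx]
  rw [hany]
  simp

-- inner loop of A: key already last entry
theorem pv_inner_last (tl : String) (k : String) (kws : List String) :
    ∀ (pre : List (String × Int)) (v : Int), (∀ p ∈ pre, (p.1 == k) = false) →
    kws.foldl (fun d kw => if pvCond tl kw then d.modify k 0 (· + 1) else d) (PySem.Dict.mk (pre ++ [(k, v)]))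
      = PySem.Dict.mk (pre ++ [(k, v + (kws.countP (pvCond tl) : Int))]) := by
  induction kws with
  | nil => intro pre v h; simp
  | cons kw kws ih =>
    intro pre v h
    simp only [List.foldl_cons]
    by_cases hc : pvCond tl kw = true
    · rw [if_pos hc, pv_modify_last pre k v h, ih pre (v + 1) h]
      have hv : v + 1 + (kws.countP (pvCond tl) : Int) = ((kw :: kws).countP (pvCond tl) : Int) + v := by
        rw [List.countP_cons, if_pos hc]; push_cast; ring
      rw [hv]; ring_nf
    · rw [if_neg hc, ih pre v h, List.countP_cons, if_neg hc]
      simp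

-- inner loop of A: key absent from the dict
theorem pv_inner_absent (tl : String) (k : String) (kws : List String)
    (L : List (String × Int)) (h : ∀ p ∈ L, (p.1 == k) = false) :
    kws.foldl (fun d kw => if pvCond tl kw then d.modify k 0 (· + 1) else d) (PySem.Dict.mk L)
      = if kws.countP (pvCond tl) = 0 then PySem.Dict.mk L
        else PySem.Dict.mk (L ++ [(k, (kws.countP (pvCond tl) : Int))]) := by
  induction kws with
  | nil => simp
  | cons kw kws ih =>
    simp only [List.foldl_cons]
    by_cases hc : pvCond tl kw = true
    · rw [if_pos hc, pv_modify_absent L k h, pv_inner_last tl k kws L 1 h]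
      rw [List.countP_cons, if_pos hc, if_neg (by omega)]
      have hv : (1 : Int) + (kws.countP (pvCond tl) : Int) = ((kws.countP (pvCond tl) + 1 : Nat) : Int) := by push_cast; ring
      rw [hv]
    · rw [if_neg hc, ih, List.countP_cons, if_neg hc]
      simp

-- outer loop of A: the Counter's items are exactly the positive-score subdomains in order
theorem pv_outer (tl : String) :
    ∀ (subs : List (String × List String)) (L : List (String × Int)),
    (∀ q ∈ L, ∀ p ∈ subs, (q.1 == p.1) = false) → (subs.map Prod.fst).Nodup →
    subs.foldl
      (fun d p => p.2.foldl (fun d kw => if pvCond tl kw then d.modify p.1 0 (· + 1) else d) d)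
      (PySem.Dict.mk L)
      = PySem.Dict.mk (L ++ pvItems tl subs) := by
  intro subs
  induction subs with
  | nil => intro L _ _; simp [pvItems]
  | cons p subs ih =>
    intro L hdisj hnd
    simp only [List.foldl_cons]
    have hL : ∀ q ∈ L, (q.1 == p.1) = false := fun q hq => hdisj q hq p (by simp)
    rw [pv_inner_absent tl p.1 p.2 L hL]
    have hnd2 : (p.1 :: subs.map Prod.fst).Nodup := by simpa using hnd
    have hnd' : (subs.map Prod.fst).Nodup := (List.nodup_cons.mp hnd2).2
    have hpnot : p.1 ∉ subs.map Prod.fst := (List.nodup_cons.mp hnd2).1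
    by_cases hc : p.2.countP (pvCond tl) = 0
    · rw [if_pos hc]
      rw [ih L (fun q hq r hr => hdisj q hq r (by simp [hr])) hnd']
      have : pvItems tl (p :: subs) = pvItems tl subs := by
        simp [pvItems, hc]
      rw [this]
    · rw [if_neg hc]
      have hdisj' : ∀ q ∈ L ++ [(p.1, (p.2.countP (pvCond tl) : Int))], ∀ r ∈ subs, (q.1 == r.1) = false := by
        intro q hq r hr
        rcases List.mem_append.mp hq with h1 | h1
        · exact hdisj q h1 r (by simp [hr])
        · simp only [List.mem_singleton] at h1
          subst h1
          simp only [beq_eq_false_iff_ne, ne_eq]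
          intro he
          exact hpnot (he ▸ List.mem_map_of_mem hr)
      rw [ih _ hdisj' hnd']
      have : pvItems tl (p :: subs) = (p.1, (p.2.countP (pvCond tl) : Int)) :: pvItems tl subs := by
        simp [pvItems, hc, pvScore]
      rw [this, List.append_assoc]
      simp

-- head of the stable reverse sort is the first maximum
theorem pv_insertBy_head (bef : String × Int → String × Int → Bool) (x : String × Int)
    (acc : List (String × Int)) :
    (PySem.List.insertBy bef x acc).head? =
      some (match acc with | [] => x | y :: _ => if bef x y then x else y) := by
  cases acc with
  | nil => simp [PySem.List.insertBy]
  | cons y ys =>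
    by_cases h : bef x y = true
    · simp [PySem.List.insertBy, h]
    · simp [PySem.List.insertBy, h]

theorem pv_head_fold (l : List (String × Int)) :
    ∀ acc : List (String × Int),
    (l.foldl (fun a x => PySem.List.insertBy (fun a b => decide (b.2 < a.2)) x a) acc).head?
      = l.foldl pvFmStep acc.head? := by
  induction l with
  | nil => intro acc; rfl
  | cons x l ih =>
    intro acc
    simp only [List.foldl_cons]
    rw [ih]
    congr 1
    rw [pv_insertBy_head]
    cases acc with
    | nil => rfl
    | cons y ys =>
      simp only [List.head?_cons, pvFmStep]
      by_cases h : y.2 < x.2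
      · simp [h]
      · simp [h]

theorem pv_head_sorted_rev (l : List (String × Int)) :
    (PySem.List.sorted l (fun q => q.2) true).head? = pvFm l := by
  rw [PySem.List.sorted_rev_eq_foldl_insertBy]
  simpa [pvFm] using pv_head_fold l []

-- ===== B side =====

-- B's index-building nested loop, flattened to a single fold over the occurrence pairs
theorem pvB_index_eq (subs : List (String × List String)) :
    subs.foldl
      (fun d p => p.2.foldl (fun d kw => d.modify (PySem.Str.lower kw) [] (fun l => l ++ [p.1])) d)
      PySem.Dict.empty
      = (pvPairs subs).foldl (fun d q => d.modify q.1 [] (fun l => l ++ [q.2])) PySem.Dict.empty := by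
  rw [pvPairs, List.foldl_flatMap]
  apply PySem.List.foldl_congr_mem
  intro d p _
  rw [List.foldl_map]

-- B's crediting loop over the index items: per-name score = count in the credited-name list
theorem pvB_scores_getD (tl : String) (its : List (String × List String)) :
    ∀ (s : PySem.Dict String Int) (n : String),
    (its.foldl
      (fun s q => if PySem.Str.isIn q.1 tl then q.2.foldl (fun s name => s.modify name 0 (· + 1)) s else s)
      s).getD n 0
      = s.getD n 0 + ((its.flatMap (fun q => if PySem.Str.isIn q.1 tl then q.2 else [])).count n : Int) := by
  induction its with
  | nil => intro s n; simp
  | cons q its ih =>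
    intro s n
    simp only [List.foldl_cons, List.flatMap_cons, List.count_append]
    by_cases h : PySem.Str.isIn q.1 tl = true
    · rw [if_pos h, if_pos h, ih, PySem.Dict.getD_foldl_modify_add_one]
      push_cast; ring
    · rw [if_neg h, if_neg h, ih]
      simp

-- the disjoint split of a countP along a boolean test
theorem pv_countP_split {α} (l : List α) (p r : α → Bool) :
    l.countP p = (l.filter r).countP p + (l.filter (fun a => !r a)).countP p :=
  List.countP_eq_countP_filter_add l p r

-- bucketed counting: summing the gated per-key buckets over the (nodup, covering) key list
-- recovers the direct count over the pair list
theorem pv_buckets_count (tl : String) (n : String) :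
    ∀ (ks : List String) (pairs : List (String × String)), ks.Nodup →
    (∀ q ∈ pairs, q.1 ∈ ks) →
    ((ks.flatMap (fun k =>
        if PySem.Str.isIn k tl then ((pairs.filter (fun q => q.1 == k)).map (fun q => q.2)) else [])).count n)
      = pairs.countP (fun q => PySem.Str.isIn q.1 tl && q.2 == n) := by
  intro ks
  induction ks with
  | nil =>
    intro pairs _ hcov
    have : pairs = [] := by
      cases pairs with
      | nil => rfl
      | cons q _ => exact absurd (hcov q (by simp)) (by simp)
    simp [this]
  | cons k ks ih =>
    intro pairs hnd hcov
    have hknot : k ∉ ks := (List.nodup_cons.mp hnd).1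
    have hnd' : ks.Nodup := (List.nodup_cons.mp hnd).2
    simp only [List.flatMap_cons, List.count_append]
    -- the tail buckets only see the pairs whose key is not k
    have htail :
        ks.flatMap (fun k' =>
          if PySem.Str.isIn k' tl then ((pairs.filter (fun q => q.1 == k')).map (fun q => q.2)) else [])
        = ks.flatMap (fun k' =>
          if PySem.Str.isIn k' tl then
            (((pairs.filter (fun q => !(q.1 == k))).filter (fun q => q.1 == k')).map (fun q => q.2))
          else []) := by
      apply List.flatMap_congr
      intro k' hk'
      have hne : k' ≠ k := by rintro rfl; exact hknot hk'
      have : pairs.filter (fun q => q.1 == k') = (pairs.filter (fun q => !(q.1 == k))).filter (fun q => q.1 == k') := by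
        rw [List.filter_filter]
        apply List.filter_congr
        intro q _
        by_cases hq : q.1 = k'
        · simp [hq, hne]
        · simp [hq]
      rw [this]
    rw [htail, ih _ hnd' (by
      intro q hq
      rcases List.mem_filter.mp hq with ⟨hq1, hq2⟩
      have := hcov q hq1
      simp only [List.mem_cons] at this
      rcases this with h1 | h1
      · exfalso; simp [h1] at hq2
      · exact h1)]
    -- split the direct count by q.1 == k
    rw [pv_countP_split pairs (fun q => PySem.Str.isIn q.1 tl && q.2 == n) (fun q => q.1 == k)]
    have hhead :
        (if PySem.Str.isIn k tl then ((pairs.filter (fun q => q.1 == k)).map (fun q => q.2)) else []).count n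
          = (pairs.filter (fun q => q.1 == k)).countP (fun q => PySem.Str.isIn q.1 tl && q.2 == n) := by
      by_cases h : PySem.Str.isIn k tl = true
      · rw [if_pos h, List.count_eq_countP, List.countP_map]
        apply List.countP_congr
        intro q hq
        have hqk : q.1 = k := by simpa using (List.mem_filter.mp hq).2
        simp only [Function.comp]
        rw [hqk, h]
        simp
      · have hf : PySem.Str.isIn k tl = false := by
          revert h; cases PySem.Str.isIn k tl <;> simp
        rw [if_neg h]
        rw [List.countP_eq_zero.mpr (by
          intro q hq
          have hqk : q.1 = k := by simpa using (List.mem_filter.mp hq).2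
          rw [hqk, hf]
          simp)]
        simp
    rw [hhead]

-- with distinct subdomain names, the pair-list count for a listed subdomain is its keyword score
theorem pv_pairs_countP_notmem (tl : String) (n : String) :
    ∀ (subs : List (String × List String)), n ∉ subs.map Prod.fst →
    (pvPairs subs).countP (fun q => PySem.Str.isIn q.1 tl && q.2 == n) = 0 := by
  intro subs
  induction subs with
  | nil => intro _; simp [pvPairs]
  | cons p subs ih =>
    intro hn
    simp only [List.map_cons, List.mem_cons] at hn
    push Not at hn
    simp only [pvPairs, List.flatMap_cons, List.countP_append]
    rw [List.countP_map]
    rw [List.countP_eq_zero.mpr (by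
      intro kw _
      simp only [Function.comp]
      have hne : (p.1 == n) = false := by
        simp only [beq_eq_false_iff_ne, ne_eq]
        exact fun he => hn.1 he.symm
      rw [hne]
      simp)]
    simpa [pvPairs] using ih hn.2

theorem pv_pairs_countP (tl : String) :
    ∀ (subs : List (String × List String)), (subs.map Prod.fst).Nodup →
    ∀ p ∈ subs,
    (pvPairs subs).countP (fun q => PySem.Str.isIn q.1 tl && q.2 == p.1) = p.2.countP (pvCond tl) := by
  intro subs
  induction subs with
  | nil => intro _ p hp; simp at hp
  | cons r subs ih =>
    intro hnd p hp
    have hnd2 : (r.1 :: subs.map Prod.fst).Nodup := by simpa using hnd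
    have hrnot : r.1 ∉ subs.map Prod.fst := (List.nodup_cons.mp hnd2).1
    have hnd' : (subs.map Prod.fst).Nodup := (List.nodup_cons.mp hnd2).2
    simp only [pvPairs, List.flatMap_cons, List.countP_append]
    rcases List.mem_cons.mp hp with h1 | h1
    · subst h1
      rw [List.countP_map]
      have h2 : (pvPairs subs).countP (fun q => PySem.Str.isIn q.1 tl && q.2 == p.1) = 0 :=
        pv_pairs_countP_notmem tl p.1 subs hrnot
      simp only [pvPairs] at h2
      rw [h2]
      have hfn : ((fun (q : String × String) => PySem.Str.isIn q.1 tl && q.2 == p.1) ∘ (fun kw => (PySem.Str.lower kw, p.1)))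
          = pvCond tl := by
        funext kw
        simp [Function.comp, pvCond]
      rw [hfn]
      simp
    · rw [List.countP_map]
      rw [List.countP_eq_zero.mpr (by
        intro kw _
        simp only [Function.comp]
        have hne : (r.1 == p.1) = false := by
          simp only [beq_eq_false_iff_ne, ne_eq]
          intro he
          exact hrnot (he ▸ List.mem_map_of_mem h1)
        rw [hne]
        simp)]
      have := ih hnd' p h1
      simpa [pvPairs] using this

-- B's computed score for each listed subdomain is exactly pvScore
theorem pvB_score_eq (text : String) (subs : List (String × List String))
    (hnd : (subs.map Prod.fst).Nodup) (p : String × List String) (hp : p ∈ subs) :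
    (((subs.foldl
         (fun d r => r.2.foldl (fun d kw => d.modify (PySem.Str.lower kw) [] (fun l => l ++ [r.1])) d)
         PySem.Dict.empty).items.foldl
       (fun s q =>
         if PySem.Str.isIn q.1 (PySem.Str.lower text) then q.2.foldl (fun s name => s.modify name 0 (· + 1)) s else s)
       PySem.Dict.empty).getD p.1 0)
      = pvScore (PySem.Str.lower text) p := by
  rw [pvB_index_eq subs]
  set tl := PySem.Str.lower text with htl
  set idx := (pvPairs subs).foldl (fun d q => d.modify q.1 [] (fun l => l ++ [q.2])) PySem.Dict.empty with hidx
  rw [pvB_scores_getD]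
  rw [PySem.Dict.getD_empty, zero_add]
  have hkeys : idx.keys = PySem.Set.update (PySem.Dict.empty : PySem.Dict String (List String)).keys ((pvPairs subs).map Prod.fst) := by
    rw [hidx]
    exact PySem.Dict.keys_foldl_modify_key (pvPairs subs) Prod.fst [] (fun _ q l => l ++ [q.2]) PySem.Dict.empty
  have hkeys' : idx.keys = PySem.Set.ofList ((pvPairs subs).map Prod.fst) := by
    rw [hkeys, PySem.Dict.keys_empty]
    simp [PySem.Set.update, PySem.Set.ofList_eq_foldl]
  have hndk : idx.keys.Nodup := by
    rw [hkeys']; exact PySem.Set.nodup_ofList _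
  have hitems : idx.items = idx.keys.map (fun k => (k, idx.getD k [])) :=
    PySem.Dict.items_eq_map_keys idx hndk []
  have hgetD : ∀ k, idx.getD k [] = ((pvPairs subs).filter (fun q => q.1 == k)).map (fun q => q.2) := by
    intro k
    rw [hidx, PySem.Dict.getD_foldl_modify_append, PySem.Dict.getD_empty, List.nil_append]
  have hflat :
      idx.items.flatMap (fun q => if PySem.Str.isIn q.1 tl then q.2 else [])
        = idx.keys.flatMap (fun k =>
            if PySem.Str.isIn k tl then ((pvPairs subs).filter (fun q => q.1 == k)).map (fun q => q.2) else []) := by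
    rw [hitems, List.flatMap_map]
    apply List.flatMap_congr
    intro k _
    simp only [hgetD k]
  rw [hflat]
  rw [pv_buckets_count tl p.1 idx.keys (pvPairs subs) hndk (by
    intro q hq
    rw [hkeys', PySem.Set.mem_ofList]
    exact List.mem_map_of_mem hq)]
  rw [pv_pairs_countP tl subs hnd p hp]
  simp [pvScore]

-- B's final scan over the subdomains computes the first maximum of the positive-score items
theorem pvB_scan (tl : String) :
    ∀ (subs : List (String × List String)) (o : Option (String × Int)),
    (∀ b, o = some b → 0 < b.2) →
    subs.foldl
      (fun (acc : Option (String × Int)) p =>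
        if 0 < pvScore tl p && (match acc with | none => true | some b => decide (b.2 < pvScore tl p)) then
          some (p.1, pvScore tl p)
        else acc)
      o
      = (pvItems tl subs).foldl pvFmStep o := by
  intro subs
  induction subs with
  | nil => intro o _; simp [pvItems]
  | cons p subs ih =>
    intro o ho
    simp only [List.foldl_cons]
    by_cases hc : p.2.countP (pvCond tl) = 0
    · rw [if_neg (by simp [pvScore, hc])]
      have hdrop : pvItems tl (p :: subs) = pvItems tl subs := by simp [pvItems, hc]
      rw [hdrop]
      exact ih o ho
    · have hpos : 0 < pvScore tl p := by
        simp only [pvScore]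
        exact_mod_cast Nat.pos_of_ne_zero hc
      have hitems : pvItems tl (p :: subs) = (p.1, pvScore tl p) :: pvItems tl subs := by
        simp [pvItems, hc, pvScore]
      rw [hitems, List.foldl_cons]
      cases o with
      | none =>
        rw [if_pos (by simp [hpos])]
        rw [show pvFmStep none (p.1, pvScore tl p) = some (p.1, pvScore tl p) from rfl]
        exact ih _ (by intro b hb; injection hb with h; rw [← h]; exact hpos)
      | some b =>
        have hb := ho b rfl
        by_cases hlt : b.2 < pvScore tl p
        · rw [if_pos (by simp [hpos, hlt])]
          rw [show pvFmStep (some b) (p.1, pvScore tl p) = some (p.1, pvScore tl p) from by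
            simp [pvFmStep, hlt]]
          exact ih _ (by intro c hcq; injection hcq with h; rw [← h]; exact hpos)
        · rw [if_neg (by simp [hlt])]
          rw [show pvFmStep (some b) (p.1, pvScore tl p) = some b from by
            simp [pvFmStep, hlt]]
          exact ih _ (by intro c hcq; injection hcq with h; rw [← h]; exact hb)

theorem pv_main (text : String) (subdomains : List (String × List String))
    (hpre : (subdomains.map Prod.fst).Nodup) :
    classify_subdomain_py text subdomains = classify_subdomain_py_alt text subdomains := by
  have hfold : ∀ kw : String, PySem.Str.isIn (PySem.Str.lower kw) (PySem.Str.lower text) = pvCond (PySem.Str.lower text) kw := fun _ => rfl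
  simp only [classify_subdomain_py, classify_subdomain_py_alt]
  -- B side: replace the index-based score of each listed subdomain by pvScore, then run the scan
  rw [PySem.List.foldl_congr_mem subdomains _
      (fun (acc : Option (String × Int)) p =>
        if 0 < pvScore (PySem.Str.lower text) p &&
            (match acc with | none => true | some b => decide (b.2 < pvScore (PySem.Str.lower text) p)) then
          some (p.1, pvScore (PySem.Str.lower text) p)
        else acc)
      none
      (by
        intro acc p hp
        rw [pvB_score_eq text subdomains hpre p hp])]
  rw [pvB_scan (PySem.Str.lower text) subdomains none (by intro b hb; cases hb)]
  -- A side: the Counter is exactly the positive-score items, and the head of the stable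
  -- reverse sort is their first maximum
  simp only [PySem.Dict.empty]
  simp only [hfold]
  rw [pv_outer (PySem.Str.lower text) subdomains [] (by simp) hpre]
  simp only [List.nil_append]
  rw [pv_head_sorted_rev]
  simp only [pvFm]
  cases pvItems (PySem.Str.lower text) subdomains with
  | nil => simp
  | cons x xs => simp

-- ===== VERDICT (by name: the statement is the Claim_ definition above) =====
theorem classify_subdomain_py_spec : Claim_equal_classify_subdomain_py := by
  intro text subdomains _ hpre
  unfold Spec_classify_subdomain_py
  exact pv_main text subdomains hpre
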